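-- pv_equiv track=rewrite | github.com/IvanLaraR/Busquedas_en_Grafos | 15_Algoritmos_Genéticos.py | cruzar
-- ===== SOURCE A (Python) =====
-- def cruzar(padre1, padre2):
--     descendencia = {}
--     genes_padre1 = list(padre1.keys())
--     genes_padre2 = list(padre2.keys())
--     genes_comunes = set(genes_padre1) & set(genes_padre2)
--     genes_distintos = set(genes_padre1) ^ set(genes_padre2)
--     for gen in genes_comunes:
--         descendencia[gen] = (padre1[gen] + padre2[gen]) // 2
--     for gen in genes_distintos:
--         if gen in genes_padre1:
--             descendencia[gen] = padre1[gen]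
--         else:
--             descendencia[gen] = padre2[gen]
--     return descendencia
-- ===== SOURCE B (Python) =====
-- def cruzar(padre1, padre2):
--     # Single simultaneous-partition pass over padre1 into two accumulators,
--     # then merge and append padre2-only genes.
--     comunes = {}
--     solo1 = {}
--     for gen, val in padre1.items():
--         if gen in padre2:
--             comunes[gen] = (val + padre2[gen]) // 2
--         else:
--             solo1[gen] = val
--     descendencia = {**comunes, **solo1}
--     for gen, val in padre2.items():
--         if gen not in padre1:
--             descendencia[gen] = val
--     return descendencia
-- ===== Notes on version B (the rewrite author's own statement) =====
-- stated objective: faster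
-- what changed: B classifies each gene of padre1 in one simultaneous-partition pass into two accumulator dicts (averaged-common and padre1-only) with O(1) dict membership tests, merges them, and appends padre2-only genes, instead of A's materialised key lists, set intersection/symmetric-difference and two loops with a linear 'gen in genes_padre1' list scan.
import Mathlib
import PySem

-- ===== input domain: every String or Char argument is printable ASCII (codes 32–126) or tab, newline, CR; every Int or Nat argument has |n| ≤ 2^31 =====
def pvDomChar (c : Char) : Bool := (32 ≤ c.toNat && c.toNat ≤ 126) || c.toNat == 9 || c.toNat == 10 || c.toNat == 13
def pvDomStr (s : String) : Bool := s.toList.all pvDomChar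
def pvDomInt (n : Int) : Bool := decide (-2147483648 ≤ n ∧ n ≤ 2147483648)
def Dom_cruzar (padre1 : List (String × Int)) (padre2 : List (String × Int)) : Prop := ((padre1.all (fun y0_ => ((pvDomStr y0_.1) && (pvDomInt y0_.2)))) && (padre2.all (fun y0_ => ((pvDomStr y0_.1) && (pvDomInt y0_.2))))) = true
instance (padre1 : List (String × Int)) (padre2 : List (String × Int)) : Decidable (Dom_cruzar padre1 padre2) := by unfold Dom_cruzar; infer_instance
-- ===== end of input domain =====

-- B replaces A's key-set algebra and two partition loops by one simultaneous-partition
-- pass over padre1 into two accumulators, a merge, and one pass over padre2 (objective: faster).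
-- Both functions return a dict; dict outputs are compared as key→value maps, so the
-- (hash-dependent) iteration order of A's Python sets does not affect the result, and the
-- ports fix the deterministic PySem.Set order (first-insertion order).

-- ===== PORT A =====
-- 'padre1[gen]' / 'padre2[gen]' cannot raise here: 'gen' always comes from the keys of the
-- dict being indexed, so 'getD … 0' is exact (the default is never used).
def cruzar (padre1 : List (String × Int)) (padre2 : List (String × Int)) : List (String × Int) :=
  let d1 := PySem.Dict.ofList padre1
  let d2 := PySem.Dict.ofList padre2
  let descendencia : PySem.Dict String Int := PySem.Dict.empty
  let genes_padre1 := d1.keys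
  let genes_padre2 := d2.keys
  let genes_comunes := PySem.Set.inter (PySem.Set.ofList genes_padre1) (PySem.Set.ofList genes_padre2)
  let genes_distintos := PySem.Set.symmDiff (PySem.Set.ofList genes_padre1) (PySem.Set.ofList genes_padre2)
  let descendencia := genes_comunes.foldl
    (fun d gen => d.insert gen (PySem.Int.floordiv (d1.getD gen 0 + d2.getD gen 0) 2)) descendencia
  let descendencia := genes_distintos.foldl
    (fun d gen => if genes_padre1.contains gen then d.insert gen (d1.getD gen 0)
                  else d.insert gen (d2.getD gen 0)) descendencia
  descendencia.items

-- ===== PORT B =====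
-- one pass over padre1.items() filling the pair (comunes, solo1); '{**comunes, **solo1}'
-- is ported as inserting solo1's items into comunes in order; then one pass over padre2.items().
def cruzar_alt (padre1 : List (String × Int)) (padre2 : List (String × Int)) : List (String × Int) :=
  let d1 := PySem.Dict.ofList padre1
  let d2 := PySem.Dict.ofList padre2
  let cs := d1.items.foldl
    (fun (cs : PySem.Dict String Int × PySem.Dict String Int) p =>
      if d2.contains p.1 then (cs.1.insert p.1 (PySem.Int.floordiv (p.2 + d2.getD p.1 0) 2), cs.2)
      else (cs.1, cs.2.insert p.1 p.2))
    (PySem.Dict.empty, PySem.Dict.empty)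
  let descendencia := cs.2.items.foldl (fun d p => d.insert p.1 p.2) cs.1
  let descendencia := d2.items.foldl
    (fun d p => if !d1.contains p.1 then d.insert p.1 p.2 else d) descendencia
  descendencia.items

-- ===== PRECONDITION & SPEC =====
def Spec_cruzar (padre1 : List (String × Int)) (padre2 : List (String × Int)) (out : List (String × Int)) : Prop := out = cruzar_alt padre1 padre2
instance (padre1 : List (String × Int)) (padre2 : List (String × Int)) (out : List (String × Int)) : Decidable (Spec_cruzar padre1 padre2 out) := by unfold Spec_cruzar; infer_instance

-- ===== CLAIM (what is proved, stated in full; the proofs are below) =====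
def Claim_equal_cruzar : Prop := ∀ (padre1 : List (String × Int)) (padre2 : List (String × Int)), Dom_cruzar padre1 padre2 → Spec_cruzar padre1 padre2 (cruzar padre1 padre2)

-- ===== LEMMAS AND PROOFS =====

-- A fold that updates exactly one component of a pair per step, chosen by a predicate,
-- is the pair of folds over the two filtered sublists.
theorem foldl_pair_partition {α β γ : Type} (P : α → Bool) (f : β → α → β) (g : γ → α → γ)
    (L : List α) (c : β) (s : γ) :
    L.foldl (fun cs p => if P p then (f cs.1 p, cs.2) else (cs.1, g cs.2 p)) (c, s)
    = ((L.filter P).foldl f c, (L.filter (fun p => !P p)).foldl g s) := by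
  induction L generalizing c s with
  | nil => rfl
  | cons a t ih => by_cases h : P a <;> simp [h, ih]

-- The heart of the proof: for two dicts (whose key lists are duplicate-free),
-- A's set-partition construction and B's partition-pass-and-merge construction
-- build dicts with the same items list.
theorem core_items (d1 d2 : PySem.Dict String Int)
    (n1 : d1.keys.Nodup) (n2 : d2.keys.Nodup) :
    ((PySem.Set.symmDiff (PySem.Set.ofList d1.keys) (PySem.Set.ofList d2.keys)).foldl
      (fun d gen => if d1.keys.contains gen then d.insert gen (d1.getD gen 0)
                    else d.insert gen (d2.getD gen 0))
      ((PySem.Set.inter (PySem.Set.ofList d1.keys) (PySem.Set.ofList d2.keys)).foldl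
        (fun d gen => d.insert gen (PySem.Int.floordiv (d1.getD gen 0 + d2.getD gen 0) 2))
        PySem.Dict.empty)).items
    =
    (d2.items.foldl (fun d p => if !d1.contains p.1 then d.insert p.1 p.2 else d)
      ((d1.items.foldl
          (fun (cs : PySem.Dict String Int × PySem.Dict String Int) p =>
            if d2.contains p.1 then (cs.1.insert p.1 (PySem.Int.floordiv (p.2 + d2.getD p.1 0) 2), cs.2)
            else (cs.1, cs.2.insert p.1 p.2))
          (PySem.Dict.empty, PySem.Dict.empty)).2.items.foldl
        (fun d p => d.insert p.1 p.2)
        (d1.items.foldl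
          (fun (cs : PySem.Dict String Int × PySem.Dict String Int) p =>
            if d2.contains p.1 then (cs.1.insert p.1 (PySem.Int.floordiv (p.2 + d2.getD p.1 0) 2), cs.2)
            else (cs.1, cs.2.insert p.1 p.2))
          (PySem.Dict.empty, PySem.Dict.empty)).1)).items := by
  have hc1 : ∀ x : String, d1.contains x = d1.keys.contains x := fun x => by
    rw [Bool.eq_iff_iff, PySem.Dict.contains_iff_mem_keys, List.contains_iff_mem]
  have hc2 : ∀ x : String, d2.contains x = d2.keys.contains x := fun x => by
    rw [Bool.eq_iff_iff, PySem.Dict.contains_iff_mem_keys, List.contains_iff_mem]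
  set L1 := d1.items.filter (fun p => d2.contains p.1) with hL1
  set L2 := d1.items.filter (fun p => !d2.contains p.1) with hL2
  set L3 := d2.items.filter (fun p => !d1.contains p.1) with hL3
  have hk1 : d1.keys = d1.items.map (fun p => p.1) := rfl
  have hk2 : d2.keys = d2.items.map (fun p => p.1) := rfl
  have hsub1 : (L1.map (fun p => p.1)).Sublist d1.keys := by
    rw [hk1]; exact List.Sublist.map _ List.filter_sublist
  have hsub2 : (L2.map (fun p => p.1)).Sublist d1.keys := by
    rw [hk1]; exact List.Sublist.map _ List.filter_sublist
  have hsub3 : (L3.map (fun p => p.1)).Sublist d2.keys := by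
    rw [hk2]; exact List.Sublist.map _ List.filter_sublist
  have contains_false : ∀ (d : PySem.Dict String Int) (k : String), k ∉ d.keys → d.contains k = false := by
    intro d k h
    cases hc : d.contains k with
    | false => rfl
    | true => exact absurd ((PySem.Dict.contains_iff_mem_keys _ _).mp hc) h
  have nod1 : (L1.map (fun q => q.1)).Nodup := List.Nodup.sublist hsub1 n1
  have nod2 : (L2.map (fun q => q.1)).Nodup := List.Nodup.sublist hsub2 n1
  have nod3 : (L3.map (fun q => q.1)).Nodup := List.Nodup.sublist hsub3 n2
  -- ===== B side =====
  -- split the pair fold into the two filtered folds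
  rw [foldl_pair_partition (fun p => d2.contains p.1)
        (fun c p => c.insert p.1 (PySem.Int.floordiv (p.2 + d2.getD p.1 0) 2))
        (fun s p => s.insert p.1 p.2) d1.items PySem.Dict.empty PySem.Dict.empty]
  rw [← hL1, ← hL2]
  rw [← List.foldl_filter (l := d2.items)]
  rw [← hL3]
  -- comunes and solo1
  have e1 := PySem.Dict.items_foldl_insert_fresh L1 (fun q => q.1)
    (fun q => PySem.Int.floordiv (q.2 + d2.getD q.1 0) 2) (PySem.Dict.empty : PySem.Dict String Int)
    (fun a _ => PySem.Dict.contains_empty _) nod1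
  have e2 := PySem.Dict.items_foldl_insert_fresh L2 (fun q => q.1) (fun q => q.2)
    (PySem.Dict.empty : PySem.Dict String Int) (fun a _ => PySem.Dict.contains_empty _) nod2
  beta_reduce at e1 e2
  have hkCom : (L1.foldl (fun c p => c.insert p.1 (PySem.Int.floordiv (p.2 + d2.getD p.1 0) 2))
      (PySem.Dict.empty : PySem.Dict String Int)).keys
      = PySem.Set.update PySem.Dict.empty.keys (L1.map (fun q => q.1)) :=
    PySem.Dict.keys_foldl_insert_key L1 (fun q => q.1) _ _
  -- merging solo1 into comunes inserts only fresh keys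
  have freshM : ∀ p ∈ (L2.foldl (fun s p => s.insert p.1 p.2)
      (PySem.Dict.empty : PySem.Dict String Int)).items,
      (L1.foldl (fun c p => c.insert p.1 (PySem.Int.floordiv (p.2 + d2.getD p.1 0) 2))
        (PySem.Dict.empty : PySem.Dict String Int)).contains p.1 = false := by
    intro p hp
    rw [e2] at hp
    have hpL2 : p ∈ L2 := by simpa [PySem.Dict.items, PySem.Dict.empty] using hp
    apply contains_false
    rw [hkCom]
    intro hmem
    have hmem' : p.1 ∈ L1.map (fun q => q.1) := by
      have := (PySem.Set.mem_update _ _ _).mp hmem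
      simpa [PySem.Dict.keys, PySem.Dict.empty, PySem.Dict.items] using this
    obtain ⟨q, hq, hq1⟩ := List.mem_map.mp hmem'
    have hq2 : d2.contains q.1 = true := by simpa using (List.mem_filter.mp hq).2
    have hp2 : d2.contains p.1 = false := by simpa using (List.mem_filter.mp hpL2).2
    rw [hq1, hp2] at hq2
    exact Bool.false_ne_true hq2
  have nodM : (((L2.foldl (fun s p => s.insert p.1 p.2)
      (PySem.Dict.empty : PySem.Dict String Int)).items).map (fun q => q.1)).Nodup := by
    rw [e2]; simpa [PySem.Dict.items, PySem.Dict.empty, List.map_map, Function.comp] using nod2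
  have eM := PySem.Dict.items_foldl_insert_fresh
    ((L2.foldl (fun s p => s.insert p.1 p.2) (PySem.Dict.empty : PySem.Dict String Int)).items)
    (fun q => q.1) (fun q => q.2) _ freshM nodM
  beta_reduce at eM
  -- keys after the merge
  have hkMer : ((L2.foldl (fun s p => s.insert p.1 p.2)
      (PySem.Dict.empty : PySem.Dict String Int)).items.foldl (fun d p => d.insert p.1 p.2)
      (L1.foldl (fun c p => c.insert p.1 (PySem.Int.floordiv (p.2 + d2.getD p.1 0) 2))
        (PySem.Dict.empty : PySem.Dict String Int))).keys
      = PySem.Set.update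
          ((L1.foldl (fun c p => c.insert p.1 (PySem.Int.floordiv (p.2 + d2.getD p.1 0) 2))
            (PySem.Dict.empty : PySem.Dict String Int)).keys)
          (((L2.foldl (fun s p => s.insert p.1 p.2)
            (PySem.Dict.empty : PySem.Dict String Int)).items).map (fun q => q.1)) :=
    PySem.Dict.keys_foldl_insert_key
      ((L2.foldl (fun s p => s.insert p.1 p.2) (PySem.Dict.empty : PySem.Dict String Int)).items)
      (fun q => q.1) (fun _ q => q.2) _
  -- the final pass only inserts fresh keys
  have fresh3 : ∀ p ∈ L3, ((L2.foldl (fun s p => s.insert p.1 p.2)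
      (PySem.Dict.empty : PySem.Dict String Int)).items.foldl (fun d p => d.insert p.1 p.2)
      (L1.foldl (fun c p => c.insert p.1 (PySem.Int.floordiv (p.2 + d2.getD p.1 0) 2))
        (PySem.Dict.empty : PySem.Dict String Int))).contains p.1 = false := by
    intro p hp
    apply contains_false
    rw [hkMer, hkCom]
    intro hmem
    have hnotg1 : p.1 ∉ d1.keys := by
      have hp1 : d1.contains p.1 = false := by simpa using (List.mem_filter.mp hp).2
      intro hm
      rw [(PySem.Dict.contains_iff_mem_keys _ _).mpr hm] at hp1
      simp at hp1
    have : p.1 ∈ L1.map (fun q => q.1) ∨ p.1 ∈ L2.map (fun q => q.1) := by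
      have h1 := (PySem.Set.mem_update _ _ _).mp hmem
      rcases h1 with h1 | h1
      · left
        have := (PySem.Set.mem_update _ _ _).mp h1
        simpa [PySem.Dict.keys, PySem.Dict.empty, PySem.Dict.items] using this
      · right
        rw [e2] at h1
        simpa [PySem.Dict.items, PySem.Dict.empty, List.map_map, Function.comp] using h1
    apply hnotg1
    rcases this with h | h
    · exact hsub1.mem h
    · exact hsub2.mem h
  have e3 := PySem.Dict.items_foldl_insert_fresh L3 (fun q => q.1) (fun q => q.2) _ fresh3 nod3
  beta_reduce at e3
  rw [e3, eM, e1, e2]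
  -- ===== A side =====
  rw [PySem.Set.ofList_eq_self_of_nodup _ n1, PySem.Set.ofList_eq_self_of_nodup _ n2]
  simp only [PySem.Set.symmDiff, PySem.Set.inter, PySem.Set.diff, PySem.Set.contains_eq_listContains]
  set C := d1.keys.filter (fun x => d2.keys.contains x) with hC0
  set P1 := d1.keys.filter (fun x => !d2.keys.contains x) with hP10
  set P2 := d2.keys.filter (fun x => !d1.keys.contains x) with hP20
  have hpush : (fun (d : PySem.Dict String Int) gen =>
      if d1.keys.contains gen = true then d.insert gen (d1.getD gen 0) else d.insert gen (d2.getD gen 0))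
      = fun d gen => d.insert gen (if d1.keys.contains gen = true then d1.getD gen 0 else d2.getD gen 0) := by
    funext d gen
    by_cases h : d1.keys.contains gen = true
    · rw [if_pos h, if_pos h]
    · rw [if_neg h, if_neg h]
  rw [hpush]
  have nodC : C.Nodup := n1.filter _
  have nodP1 : P1.Nodup := n1.filter _
  have nodP2 : P2.Nodup := n2.filter _
  have nodP12 : (P1 ++ P2).Nodup := by
    refine List.Nodup.append nodP1 nodP2 ?_
    rw [List.disjoint_left]
    intro a ha hb
    have ha1 : a ∈ d1.keys := (List.mem_filter.mp ha).1
    have hb1 : (!d1.keys.contains a) = true := (List.mem_filter.mp hb).2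
    rw [(List.contains_iff_mem).mpr ha1] at hb1
    simp at hb1
  have hkA1 : (C.foldl (fun d gen => d.insert gen (PySem.Int.floordiv (d1.getD gen 0 + d2.getD gen 0) 2))
      (PySem.Dict.empty : PySem.Dict String Int)).keys
      = PySem.Set.update PySem.Dict.empty.keys (C.map (fun g => g)) :=
    PySem.Dict.keys_foldl_insert_key C (fun g => g) _ _
  have freshA2 : ∀ g ∈ P1 ++ P2,
      (C.foldl (fun d gen => d.insert gen (PySem.Int.floordiv (d1.getD gen 0 + d2.getD gen 0) 2))
        (PySem.Dict.empty : PySem.Dict String Int)).contains g = false := by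
    intro g hg
    apply contains_false
    rw [hkA1]
    intro hmem
    have hgC : g ∈ C := by
      have := (PySem.Set.mem_update _ _ _).mp hmem
      simpa [PySem.Dict.keys, PySem.Dict.empty, PySem.Dict.items] using this
    have hgC2 : d2.keys.contains g = true := (List.mem_filter.mp hgC).2
    have hgC1 : g ∈ d1.keys := (List.mem_filter.mp hgC).1
    rcases List.mem_append.mp hg with h | h
    · have := (List.mem_filter.mp h).2
      rw [hgC2] at this
      simp at this
    · have := (List.mem_filter.mp h).2
      rw [(List.contains_iff_mem).mpr hgC1] at this
      simp at this
  have eA2 := PySem.Dict.items_foldl_insert_fresh (P1 ++ P2) (fun g => g)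
    (fun g => if d1.keys.contains g = true then d1.getD g 0 else d2.getD g 0) _ freshA2
    (by simpa using nodP12)
  have eA1 := PySem.Dict.items_foldl_insert_fresh C (fun g => g)
    (fun g => PySem.Int.floordiv (d1.getD g 0 + d2.getD g 0) 2)
    (PySem.Dict.empty : PySem.Dict String Int) (fun a _ => PySem.Dict.contains_empty _)
    (by simpa using nodC)
  beta_reduce at eA1 eA2
  rw [eA2, eA1]
  have hCL1 : C = L1.map (fun p => p.1) := by
    rw [hC0, hk1, List.filter_map]
    congr 1
    rw [hL1]
    apply List.filter_congr
    intro p _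
    exact (hc2 p.1).symm
  have hP1L2 : P1 = L2.map (fun p => p.1) := by
    rw [hP10, hk1, List.filter_map]
    congr 1
    rw [hL2]
    apply List.filter_congr
    intro p _
    simp only [Function.comp]
    rw [hc2 p.1]
  have hP2L3 : P2 = L3.map (fun p => p.1) := by
    rw [hP20, hk2, List.filter_map]
    congr 1
    rw [hL3]
    apply List.filter_congr
    intro p _
    simp only [Function.comp]
    rw [hc1 p.1]
  have t1 : List.map (fun a => (a, PySem.Int.floordiv (d1.getD a 0 + d2.getD a 0) 2)) C
      = List.map (fun a => (a.1, PySem.Int.floordiv (a.2 + d2.getD a.1 0) 2)) L1 := by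
    rw [hCL1, List.map_map]
    apply List.map_congr_left
    intro p hp
    have hpd : (p.1, p.2) ∈ d1.items := by
      have : p ∈ d1.items := (List.mem_filter.mp hp).1
      simpa using this
    have hg := PySem.Dict.getD_of_mem_items d1 hpd n1 0
    simp [Function.comp, hg]
  have t2 : List.map (fun a => (a, if d1.keys.contains a = true then d1.getD a 0 else d2.getD a 0)) P1
      = List.map (fun a => (a.1, a.2)) L2 := by
    rw [hP1L2, List.map_map]
    apply List.map_congr_left
    intro p hp
    have hp1 : p ∈ d1.items := (List.mem_filter.mp hp).1
    have hcont : d1.keys.contains p.1 = true := by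
      rw [List.contains_iff_mem, hk1]
      exact List.mem_map_of_mem hp1
    have hpd : (p.1, p.2) ∈ d1.items := by simpa using hp1
    have hg := PySem.Dict.getD_of_mem_items d1 hpd n1 0
    simp only [Function.comp]
    rw [if_pos hcont, hg]
  have t3 : List.map (fun a => (a, if d1.keys.contains a = true then d1.getD a 0 else d2.getD a 0)) P2
      = List.map (fun a => (a.1, a.2)) L3 := by
    rw [hP2L3, List.map_map]
    apply List.map_congr_left
    intro p hp
    have hp1 : p ∈ d2.items := (List.mem_filter.mp hp).1
    have hcont : d1.keys.contains p.1 = false := by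
      have := (List.mem_filter.mp hp).2
      rw [hc1 p.1] at this
      simpa using this
    have hpd : (p.1, p.2) ∈ d2.items := by simpa using hp1
    have hg := PySem.Dict.getD_of_mem_items d2 hpd n2 0
    simp only [Function.comp]
    rw [if_neg (by rw [hcont]; exact Bool.false_ne_true), hg]
  rw [List.map_append, t1, t2, t3]
  simp [PySem.Dict.empty, List.append_assoc]

theorem cruzar_eq_alt (padre1 padre2 : List (String × Int)) :
    cruzar padre1 padre2 = cruzar_alt padre1 padre2 :=
  core_items (PySem.Dict.ofList padre1) (PySem.Dict.ofList padre2)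
    (PySem.Dict.nodup_keys_ofList padre1) (PySem.Dict.nodup_keys_ofList padre2)

-- ===== VERDICT (by name: the statement is the Claim_ definition above) =====
theorem cruzar_spec : Claim_equal_cruzar := by
  intro padre1 padre2 _
  exact cruzar_eq_alt padre1 padre2
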